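-- pv_equiv track=rewrite | github.com/usnistgov/FTIR-data-analysis-PV | ftir_data_analysis/FTIR_baseline_polyfit.py | getSets
-- ===== SOURCE A (Python) =====
-- def getSets(filelist):
--     setList = [filelist[0]]
--     sets = []
--     for i in range(1, len(filelist)):
--         if '_'.join(filelist[i].split('_')[:-1]) == '_'.join(setList[0].split('_')[:-1]):   #if all but replicate number matches,
--             setList.append(filelist[i])                                                     #add to set list
--         else:
--             sets.append(setList)                                                            #if not, add completed sub list to parent list
--             setList = [filelist[i]]                                                         #and start a new sub list
--     sets.append(setList)                                                                    #add the last sub list to the parent list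
--     return sets
-- ===== SOURCE B (Python) =====
-- def getSets(filelist):
--     def key(f):
--         return '_'.join(f.split('_')[:-1])
--     sets = []
--     i, n = 0, len(filelist)
--     while i < n:
--         j = i + 1
--         while j < n and key(filelist[j]) == key(filelist[i]):
--             j += 1
--         sets.append(filelist[i:j])
--         i = j
--     return sets
-- ===== Notes on version B (the rewrite author's own statement) =====
-- stated objective: alternative
-- what changed: B replaces A's single fold over a mutable (current-set, output) accumulator with a nested run-scan: for each run start it scans forward over the filenames sharing its key and emits the slice filelist[i:j] directly; Pre_ excludes only the empty list, on which A raises IndexError (B returns []).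
import Mathlib
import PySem

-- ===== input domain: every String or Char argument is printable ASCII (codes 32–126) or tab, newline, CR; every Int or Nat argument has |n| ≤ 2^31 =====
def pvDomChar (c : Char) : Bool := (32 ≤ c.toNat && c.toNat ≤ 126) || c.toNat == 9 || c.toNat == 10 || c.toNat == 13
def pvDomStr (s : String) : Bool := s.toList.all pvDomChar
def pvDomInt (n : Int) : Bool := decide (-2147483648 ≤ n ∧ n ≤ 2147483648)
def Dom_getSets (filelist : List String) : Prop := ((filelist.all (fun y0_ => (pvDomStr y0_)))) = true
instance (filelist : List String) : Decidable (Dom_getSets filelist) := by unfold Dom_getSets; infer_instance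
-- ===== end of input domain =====

-- B replaces A's fold that rebuilds accumulator state with a nested run-scan (take/drop the
-- run of equal keys), a different decomposition of the same grouping; objective: alternative.


-- shared helper: '_'.join(f.split('_')[:-1])
def pvKey (f : String) : List Char :=
  PySem.Chars.join ['_'] (PySem.List.slice (PySem.Chars.splitOn f.toList ['_']) none (some (-1)))

-- ===== PORT A =====
-- one loop iteration of A's for-loop (state = (setList, sets)); setList[0] is setList.headD ""
-- (setList is never empty)
def getSetsStep (st : List String × List (List String)) (fi : String) :
    List String × List (List String) :=
  if pvKey fi = pvKey (st.1.headD "") then (st.1 ++ [fi], st.2)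
  else ([fi], st.2 ++ [st.1])

def getSets (filelist : List String) : List (List String) :=
  match filelist with
  | [] => []        -- Python A raises IndexError here (filelist[0]); excluded by Pre_getSets
  | f0 :: rest =>
    let r := rest.foldl getSetsStep ([f0], [])
    r.2 ++ [r.1]

-- ===== PORT B =====
-- B's outer while-loop: emit filelist[i:j] (the run of equal keys starting at i), continue at j
def getSets_alt : List String → List (List String)
  | [] => []
  | f :: rest =>
    (f :: rest.takeWhile (fun g => pvKey g == pvKey f)) ::
      getSets_alt (rest.dropWhile (fun g => pvKey g == pvKey f))
  termination_by l => l.length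
  decreasing_by
    simp only [List.length_cons]
    exact Nat.lt_succ_of_le (List.length_dropWhile_le _ _)

-- ===== PRECONDITION & SPEC =====
-- Pre_ excludes only the empty list, on which Python A raises IndexError (filelist[0]).
def Pre_getSets (filelist : List String) : Prop := filelist ≠ []
instance (filelist : List String) : Decidable (Pre_getSets filelist) := by
  unfold Pre_getSets; infer_instance
def pvWitness_getSets : List String := ["a_1", "a_2", "b_1"]

def Spec_getSets (filelist : List String) (out : List (List String)) : Prop :=
  out = getSets_alt filelist
instance (filelist : List String) (out : List (List String)) : Decidable (Spec_getSets filelist out) := by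
  unfold Spec_getSets; infer_instance

-- ===== CLAIM (what is proved, stated in full; the proofs are below) =====
def Claim_equal_getSets : Prop :=
  ∀ (filelist : List String), Dom_getSets filelist → Pre_getSets filelist →
    Spec_getSets filelist (getSets filelist)
-- ===== LEMMAS AND PROOFS =====

-- invariant: A's loop, run from state (h :: t, sets), finishes the current run (all of whose
-- members are compared against the run's first element h) and then behaves like B on the rest
theorem getSets_loop_eq (rest : List String) : ∀ (h : String) (t : List String)
    (sets : List (List String)),
    (rest.foldl getSetsStep (h :: t, sets)).2 ++ [(rest.foldl getSetsStep (h :: t, sets)).1] =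
      sets ++ ((h :: (t ++ rest.takeWhile (fun g => pvKey g == pvKey h))) ::
        getSets_alt (rest.dropWhile (fun g => pvKey g == pvKey h))) := by
  induction rest with
  | nil => intro h t sets; simp [getSets_alt]
  | cons f rs ih =>
    intro h t sets
    by_cases hk : pvKey f = pvKey h
    · rw [List.foldl_cons,
        show getSetsStep (h :: t, sets) f = (h :: (t ++ [f]), sets) from by
          simp [getSetsStep, hk]]
      rw [ih h (t ++ [f]) sets]
      simp [hk]
    · rw [List.foldl_cons,
        show getSetsStep (h :: t, sets) f = ([f], sets ++ [h :: t]) from by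
          simp [getSetsStep, hk]]
      rw [ih f [] (sets ++ [h :: t])]
      simp [hk, getSets_alt]

-- ===== VERDICT (by name: the statement is the Claim_ definition above) =====
theorem getSets_spec : Claim_equal_getSets := by
  intro filelist _ hpre
  unfold Spec_getSets
  match filelist with
  | [] => exact absurd rfl hpre
  | f0 :: rest =>
    show (rest.foldl getSetsStep ([f0], [])).2 ++ [(rest.foldl getSetsStep ([f0], [])).1] = _
    rw [getSets_loop_eq rest f0 [] []]
    simp [getSets_alt]
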